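-- pv_equiv track=rewrite | github.com/IvanTanner-dev/Daily-Logic | 2026-05-02-deepest_brackets/solution.py | get_deepest_brackets
-- ===== SOURCE A (Python) =====
-- def get_deepest_brackets(a):
--     current_depth = 0
--     max_depth = 0
--     deepest_content = ""
--     openers, closers = "([{", ")]}"
--     for char in a:
--
--         if char in openers:
--             current_depth += 1
--             if current_depth > max_depth:
--                 max_depth = current_depth
--                 deepest_content = ""
--
--         elif char in closers:
--             current_depth -= 1
--
--         else:
--             if current_depth == max_depth:
--                 deepest_content += char
--
--     return deepest_content
-- ===== SOURCE B (Python) =====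
-- def get_deepest_brackets(a):
--     openers, closers = "([{", ")]}"
--     # pass 1: running max of the depth counter
--     depth = 0
--     max_depth = 0
--     for ch in a:
--         if ch in openers:
--             depth += 1
--             max_depth = max(max_depth, depth)
--         elif ch in closers:
--             depth -= 1
--     # pass 2: collect non-bracket chars sitting at the maximum depth
--     depth = 0
--     out = []
--     for ch in a:
--         if ch in openers:
--             depth += 1
--         elif ch in closers:
--             depth -= 1
--         elif depth == max_depth:
--             out.append(ch)
--     return "".join(out)
-- ===== Notes on version B (the rewrite author's own statement) =====
-- stated objective: alternative
-- what changed: Replaces A's single fused pass (which resets the accumulated content whenever a new maximum depth is reached) with two passes: one computing the maximum depth, one collecting chars at that depth into a list joined once.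
import Mathlib
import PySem

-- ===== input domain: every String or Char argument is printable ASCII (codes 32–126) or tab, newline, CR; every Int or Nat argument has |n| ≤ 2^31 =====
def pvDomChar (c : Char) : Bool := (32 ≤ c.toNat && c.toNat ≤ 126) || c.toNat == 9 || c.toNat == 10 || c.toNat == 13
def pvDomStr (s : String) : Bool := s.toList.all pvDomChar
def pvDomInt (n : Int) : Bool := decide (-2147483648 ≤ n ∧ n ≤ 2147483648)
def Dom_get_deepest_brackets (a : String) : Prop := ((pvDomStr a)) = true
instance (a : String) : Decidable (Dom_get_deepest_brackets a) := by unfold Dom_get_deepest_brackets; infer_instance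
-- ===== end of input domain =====

-- B replaces A's fused pass (content reset at each new max) with two passes: max depth, then collect; equal return values proved on all strings.

-- ===== PORT A =====
-- A's loop body: state = (current_depth, max_depth, deepest_content as List Char)
def stepA (st : Int × Int × List Char) (c : Char) : Int × Int × List Char :=
  if c ∈ "([{".toList then
    let d := st.1 + 1
    if d > st.2.1 then (d, d, []) else (d, st.2.1, st.2.2)
  else if c ∈ ")]}".toList then (st.1 - 1, st.2.1, st.2.2)
  else if st.1 = st.2.1 then (st.1, st.2.1, st.2.2 ++ [c]) else st

def get_deepest_brackets (a : String) : String :=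
  String.mk (a.toList.foldl stepA (0, 0, [])).2.2

-- ===== PORT B =====
-- pass 1 loop body: state = (depth, max_depth)
def stepB1 (st : Int × Int) (c : Char) : Int × Int :=
  if c ∈ "([{".toList then (st.1 + 1, max st.2 (st.1 + 1))
  else if c ∈ ")]}".toList then (st.1 - 1, st.2)
  else st

-- pass 2 loop body: state = (depth, out as List Char)
def stepB2 (M : Int) (st : Int × List Char) (c : Char) : Int × List Char :=
  if c ∈ "([{".toList then (st.1 + 1, st.2)
  else if c ∈ ")]}".toList then (st.1 - 1, st.2)
  else if st.1 = M then (st.1, st.2 ++ [c]) else st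

def get_deepest_brackets_alt (a : String) : String :=
  let M := (a.toList.foldl stepB1 (0, 0)).2
  String.mk (a.toList.foldl (stepB2 M) (0, [])).2

-- ===== PRECONDITION & SPEC =====
def Spec_get_deepest_brackets (a : String) (out : String) : Prop := out = get_deepest_brackets_alt a
instance (a : String) (out : String) : Decidable (Spec_get_deepest_brackets a out) := by unfold Spec_get_deepest_brackets; infer_instance

-- ===== CLAIM (what is proved, stated in full; the proofs are below) =====
def Claim_equal_get_deepest_brackets : Prop := ∀ (a : String), Dom_get_deepest_brackets a → Spec_get_deepest_brackets a (get_deepest_brackets a)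

-- ===== LEMMAS AND PROOFS =====

-- pass 1's max_depth is monotone
lemma stepB1_mono (cs : List Char) : ∀ d m : Int, m ≤ (cs.foldl stepB1 (d, m)).2 := by
  induction cs with
  | nil => intro d m; simp
  | cons c cs ih =>
    intro d m
    simp only [List.foldl_cons, stepB1]
    split_ifs with h1 h2
    · exact le_trans (le_max_left m (d + 1)) (ih (d + 1) (max m (d + 1)))
    · exact ih (d - 1) m
    · exact ih d m

-- pass 2's accumulator factors out
lemma stepB2_acc (M : Int) (cs : List Char) :
    ∀ (d : Int) (acc : List Char),
      cs.foldl (stepB2 M) (d, acc)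
        = ((cs.foldl (stepB2 M) (d, [])).1, acc ++ (cs.foldl (stepB2 M) (d, [])).2) := by
  induction cs with
  | nil => intro d acc; simp
  | cons c cs ih =>
    intro d acc
    by_cases h1 : c ∈ "([{".toList
    · simp only [List.foldl_cons, stepB2, if_pos h1]
      exact ih _ _
    · by_cases h2 : c ∈ ")]}".toList
      · simp only [List.foldl_cons, stepB2, if_neg h1, if_pos h2]
        exact ih _ _
      · by_cases h3 : d = M
        · simp only [List.foldl_cons, stepB2, if_neg h1, if_neg h2, if_pos h3, List.nil_append]
          rw [ih d (acc ++ [c]), ih d [c]]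
          simp
        · simp only [List.foldl_cons, stepB2, if_neg h1, if_neg h2, if_neg h3]
          exact ih _ _

-- main invariant linking A's fused state to B's two passes
lemma main_inv (cs : List Char) :
    ∀ (d m : Int) (s : List Char), d ≤ m →
      cs.foldl stepA (d, m, s)
        = ((cs.foldl stepB1 (d, m)).1,
           (cs.foldl stepB1 (d, m)).2,
           (if m = (cs.foldl stepB1 (d, m)).2 then s else [])
             ++ (cs.foldl (stepB2 ((cs.foldl stepB1 (d, m)).2)) (d, [])).2) := by
  induction cs with
  | nil => intro d m s _; simp
  | cons c cs ih =>
    intro d m s hdm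
    by_cases h1 : c ∈ "([{".toList
    · by_cases h2 : d + 1 > m
      · -- opener, new max
        have hmax : max m (d + 1) = d + 1 := max_eq_right (by omega)
        simp only [List.foldl_cons, stepA, stepB1, stepB2, if_pos h1, if_pos h2, hmax]
        rw [ih (d + 1) (d + 1) [] (le_refl _)]
        have hmono := stepB1_mono cs (d + 1) (d + 1)
        have hm_ne : ¬ (m = (cs.foldl stepB1 (d + 1, d + 1)).2) := by omega
        rw [if_neg hm_ne]
        simp
      · -- opener, no new max
        have hmax : max m (d + 1) = m := max_eq_left (by omega)
        simp only [List.foldl_cons, stepA, stepB1, stepB2, if_pos h1, if_neg h2, hmax]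
        exact ih (d + 1) m s (by omega)
    · by_cases h2 : c ∈ ")]}".toList
      · -- closer
        simp only [List.foldl_cons, stepA, stepB1, stepB2, if_neg h1, if_pos h2]
        exact ih (d - 1) m s (by omega)
      · -- plain char
        by_cases h3 : d = m
        · simp only [List.foldl_cons, stepA, stepB1, stepB2, if_neg h1, if_neg h2, if_pos h3]
          rw [ih d m (s ++ [c]) hdm]
          by_cases hM : m = (cs.foldl stepB1 (d, m)).2
          · have hdM : d = (cs.foldl stepB1 (d, m)).2 := by omega
            rw [if_pos hdM, if_pos hM, if_pos hM]
            rw [stepB2_acc _ cs d ([] ++ [c])]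
            simp
          · have hmono := stepB1_mono cs d m
            have hdM : ¬ (d = (cs.foldl stepB1 (d, m)).2) := by omega
            rw [if_neg hdM, if_neg hM, if_neg hM]
        · simp only [List.foldl_cons, stepA, stepB1, stepB2, if_neg h1, if_neg h2, if_neg h3]
          rw [ih d m s hdm]
          have hmono := stepB1_mono cs d m
          have hdM : ¬ (d = (cs.foldl stepB1 (d, m)).2) := by omega
          rw [if_neg hdM]

-- ===== VERDICT (by name: the statement is the Claim_ definition above) =====
theorem get_deepest_brackets_spec : Claim_equal_get_deepest_brackets := by
  intro a _
  unfold Spec_get_deepest_brackets get_deepest_brackets get_deepest_brackets_alt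
  rw [main_inv a.toList 0 0 [] (le_refl 0)]
  simp
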